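-- pv_equiv track=rewrite | github.com/haya14busa/atcoder | ABC/027/b.py | solve
-- ===== SOURCE A (Python) =====
-- def solve(n, xs):
--     if sum(xs) % n:
--         return -1
--
--     ave = sum(xs) // n
--     carry = 0
--     cnt = 0
--
--     for x in xs:
--         carry -= ave - x
--         if carry != 0:
--             cnt += 1
--     return cnt
-- ===== SOURCE B (Python) =====
-- def solve(n, xs):
--     total = sum(xs)
--     if total % n:
--         return -1
--     ave = total // n
--     # count positions whose prefix sum deviates from the expected i*ave line
--     return sum(1 for i in range(len(xs)) if sum(xs[:i + 1]) != (i + 1) * ave)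
-- ===== Notes on version B (the rewrite author's own statement) =====
-- stated objective: alternative
-- what changed: A threads a running carry and counter through one loop; B has no running state at all: it compares each prefix sum, recomputed from a slice, against the arithmetic expectation (i+1)*ave and counts the deviating positions.
import Mathlib
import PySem

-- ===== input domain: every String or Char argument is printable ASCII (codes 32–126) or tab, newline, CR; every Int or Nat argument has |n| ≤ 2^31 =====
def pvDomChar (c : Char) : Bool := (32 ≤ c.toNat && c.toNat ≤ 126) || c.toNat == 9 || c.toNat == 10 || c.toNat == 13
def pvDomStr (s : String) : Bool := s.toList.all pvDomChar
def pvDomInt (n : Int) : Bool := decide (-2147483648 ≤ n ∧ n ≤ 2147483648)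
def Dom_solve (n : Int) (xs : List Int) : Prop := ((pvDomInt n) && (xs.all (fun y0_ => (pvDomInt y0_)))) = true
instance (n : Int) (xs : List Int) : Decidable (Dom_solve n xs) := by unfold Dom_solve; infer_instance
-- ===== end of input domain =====

-- B replaces A's running carry/counter loop by a stateless count of prefix sums deviating from (i+1)*ave (alternative decomposition, not faster).


-- ===== PORT A =====
def solve (n : Int) (xs : List Int) : Int :=
  if PySem.Int.mod xs.sum n ≠ 0 then -1
  else
    let ave := PySem.Int.floordiv xs.sum n
    (xs.foldl (fun (s : Int × Int) x =>
      let carry := s.1 - (ave - x)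
      (carry, if carry ≠ 0 then s.2 + 1 else s.2)) (0, 0)).2

-- ===== PORT B =====
def solve_alt (n : Int) (xs : List Int) : Int :=
  -- total and ave of Source B inlined (same values)
  if PySem.Int.mod xs.sum n ≠ 0 then -1
  else
    ((PySem.List.pyRange 0 (xs.length : Int) 1).map (fun i =>
      if (PySem.List.slice xs none (some (i + 1))).sum
          ≠ (i + 1) * PySem.Int.floordiv xs.sum n then (1 : Int) else 0)).sum

-- ===== PRECONDITION & SPEC =====
-- Python raises ZeroDivisionError at 'sum(xs) % n' when n = 0 (both A and B do).
def Pre_solve (n : Int) (xs : List Int) : Prop := n ≠ 0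
instance (n : Int) (xs : List Int) : Decidable (Pre_solve n xs) := by unfold Pre_solve; infer_instance
def pvWitness_solve : Int × List Int := (3, [1, 2, 3])

def Spec_solve (n : Int) (xs : List Int) (out : Int) : Prop := out = solve_alt n xs
instance (n : Int) (xs : List Int) (out : Int) : Decidable (Spec_solve n xs out) := by unfold Spec_solve; infer_instance

-- ===== CLAIM (what is proved, stated in full; the proofs are below) =====
def Claim_equal_solve : Prop := ∀ (n : Int) (xs : List Int), Dom_solve n xs → Pre_solve n xs → Spec_solve n xs (solve n xs)

-- ===== LEMMAS AND PROOFS =====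

-- A's loop counter equals the number of indices whose shifted prefix sum is nonzero.
lemma foldA_snd (ave : Int) (xs : List Int) : ∀ (carry cnt : Int),
    (xs.foldl (fun (s : Int × Int) x =>
      let c := s.1 - (ave - x)
      (c, if c ≠ 0 then s.2 + 1 else s.2)) (carry, cnt)).2
    = cnt + ((List.range xs.length).map (fun k =>
        if carry + (xs.take (k + 1)).sum - ((k : Int) + 1) * ave ≠ 0 then (1 : Int) else 0)).sum := by
  induction xs with
  | nil => intro carry cnt; simp
  | cons x xs ih =>
    intro carry cnt
    simp only [List.foldl_cons, List.length_cons, List.range_succ_eq_map,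
      List.map_cons, List.map_map, List.sum_cons]
    rw [ih]
    have hfun : ∀ k : Nat,
        ((fun k => if carry + ((x :: xs).take (k + 1)).sum - ((k : Int) + 1) * ave ≠ 0 then (1 : Int) else 0) ∘ Nat.succ) k
        = (fun k => if carry - (ave - x) + (xs.take (k + 1)).sum - ((k : Int) + 1) * ave ≠ 0 then (1 : Int) else 0) k := by
      intro k
      simp only [Function.comp_apply, List.take_succ_cons, List.sum_cons, Nat.cast_succ]
      have harith : carry + (x + (xs.take (k + 1)).sum) - ((k : Int) + 1 + 1) * ave
          = carry - (ave - x) + (xs.take (k + 1)).sum - ((k : Int) + 1) * ave := by ring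
      rw [harith]
    rw [List.map_congr_left (fun k _ => hfun k)]
    simp only [List.take_succ_cons, List.take_zero, List.sum_cons, List.sum_nil,
      Nat.cast_zero, zero_add, one_mul, add_zero]
    have hc : carry - (ave - x) = carry + x - ave := by ring
    by_cases h : carry + x - ave = 0 <;> simp [hc, h] <;> ring

-- ===== VERDICT (by name: the statement is the Claim_ definition above) =====
theorem solve_spec : Claim_equal_solve := by
  intro n xs _ _
  unfold Spec_solve solve solve_alt
  split_ifs with h
  · rfl
  · rw [foldA_snd, PySem.List.pyRange_zero_nat, List.map_map]
    simp only [zero_add, ite_not, Function.comp_def, sub_eq_zero]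
    congr 1
    apply List.map_congr_left
    intro k hk
    rw [PySem.List.slice_to (xs := xs) (b := (k : Int) + 1) (by omega),
      show ((k : Int) + 1).toNat = k + 1 by omega]
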